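-- pv_equiv track=rewrite | github.com/terraform-ibm-modules/common-dev-assets | module-assets/ci/terraformDocOverview.py | get_title
-- ===== SOURCE A (Python) =====
-- def get_title(
--     line: str, code_block: bool, comment_block: bool
-- ) -> tuple[int, str, bool, bool]:
--     level = 0
--     for c in line:
--         # set a flag to know if the lines are inside code block
--         if "```" in line:
--             code_block = not code_block
--             break
--         # one line comment, skip it
--         elif "<!--" in line and "-->" in line:
--             break
--         # comment block begin -> set flag to true
--         elif "<!--" in line:
--             comment_block = True
--             break
--         # comment block end -> set flag to false
--         elif "-->" in line:
--             comment_block = False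
--             break
--         # do not check lines if they are inside comment or code block
--         elif code_block is False and comment_block is False:
--             if c == "#":
--                 level += 1
--             else:
--                 break
--     title = line[level + 1 : -1]
--
--     return (level, title, code_block, comment_block)
-- ===== SOURCE B (Python) =====
-- def get_title(
--     line: str, code_block: bool, comment_block: bool
-- ) -> tuple[int, str, bool, bool]:
--     level = 0
--     if "```" in line:
--         code_block = not code_block
--     elif "<!--" in line and "-->" in line:
--         pass  # one-line comment: nothing to do
--     elif "<!--" in line:
--         comment_block = True
--     elif "-->" in line:
--         comment_block = False
--     elif code_block is False and comment_block is False: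
--         level = len(line) - len(line.lstrip("#"))
--     return (level, line[level + 1 : -1], code_block, comment_block)
-- ===== Notes on version B (the rewrite author's own statement) =====
-- stated objective: simpler
-- what changed: Replaced the per-character loop (which re-ran the loop-invariant substring tests on every iteration) by a single if/elif classification of the whole line, with the heading level computed in closed form as len(line) - len(line.lstrip('#')) instead of counting '#' in a loop.
import Mathlib
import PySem

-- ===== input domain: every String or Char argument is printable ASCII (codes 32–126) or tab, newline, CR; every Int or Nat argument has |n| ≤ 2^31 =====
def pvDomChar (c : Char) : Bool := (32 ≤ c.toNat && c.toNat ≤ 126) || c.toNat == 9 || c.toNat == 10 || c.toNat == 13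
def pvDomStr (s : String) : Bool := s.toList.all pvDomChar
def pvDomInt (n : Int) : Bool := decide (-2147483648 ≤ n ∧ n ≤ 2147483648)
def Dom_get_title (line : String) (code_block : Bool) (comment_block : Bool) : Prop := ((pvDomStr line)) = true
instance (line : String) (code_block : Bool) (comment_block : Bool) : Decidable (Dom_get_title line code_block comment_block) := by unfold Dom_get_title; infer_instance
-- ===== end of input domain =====

-- B replaces A's per-character loop (whose substring tests never change) by a single
-- if/elif classification of the line with the heading level in closed form (objective: simpler).

-- ===== PORT A =====
-- A's for-loop over the characters of `line`, carrying (level, code_block, comment_block);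
-- every `break` returns the current state.
def getTitleLoopA (line : List Char) (chars : List Char) (level : Nat) (cb comb : Bool) :
    Nat × Bool × Bool :=
  match chars with
  | [] => (level, cb, comb)
  | c :: rest =>
    if PySem.Chars.isIn "```".toList line then (level, !cb, comb)
    else if PySem.Chars.isIn "<!--".toList line && PySem.Chars.isIn "-->".toList line then
      (level, cb, comb)
    else if PySem.Chars.isIn "<!--".toList line then (level, cb, true)
    else if PySem.Chars.isIn "-->".toList line then (level, cb, false)
    else if cb == false && comb == false then
      if c = '#' then getTitleLoopA line rest (level + 1) cb comb
      else (level, cb, comb)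
    else getTitleLoopA line rest level cb comb

def get_title (line : String) (code_block : Bool) (comment_block : Bool) :
    Int × String × Bool × Bool :=
  let r := getTitleLoopA line.toList line.toList 0 code_block comment_block
  ((r.1 : Int), PySem.Str.slice line (some ((r.1 : Int) + 1)) (some (-1)), r.2.1, r.2.2)

-- ===== PORT B =====
def get_title_alt (line : String) (code_block : Bool) (comment_block : Bool) :
    Int × String × Bool × Bool :=
  let l := line.toList
  let st : Nat × Bool × Bool :=
    if PySem.Chars.isIn "```".toList l then (0, !code_block, comment_block)
    else if PySem.Chars.isIn "<!--".toList l && PySem.Chars.isIn "-->".toList l then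
      (0, code_block, comment_block)
    else if PySem.Chars.isIn "<!--".toList l then (0, code_block, true)
    else if PySem.Chars.isIn "-->".toList l then (0, code_block, false)
    else if code_block == false && comment_block == false then
      -- len(line) - len(line.lstrip('#')); lstrip('#') ported by hand as dropWhile (exact)
      (l.length - (l.dropWhile (· = '#')).length, code_block, comment_block)
    else (0, code_block, comment_block)
  ((st.1 : Int), PySem.Str.slice line (some ((st.1 : Int) + 1)) (some (-1)), st.2.1, st.2.2)

-- ===== PRECONDITION & SPEC =====
def Spec_get_title (line : String) (code_block : Bool) (comment_block : Bool) (out : Int × String × Bool × Bool) : Prop := out = get_title_alt line code_block comment_block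
instance (line : String) (code_block : Bool) (comment_block : Bool) (out : Int × String × Bool × Bool) : Decidable (Spec_get_title line code_block comment_block out) := by unfold Spec_get_title; infer_instance

-- ===== CLAIM (what is proved, stated in full; the proofs are below) =====
def Claim_equal_get_title : Prop := ∀ (line : String) (code_block : Bool) (comment_block : Bool), Dom_get_title line code_block comment_block → Spec_get_title line code_block comment_block (get_title line code_block comment_block)

-- ===== LEMMAS AND PROOFS =====

-- When none of the substring tests hold and both flags are false, A's loop counts leading '#'s.
theorem getTitleLoopA_count (line : List Char) (chars : List Char) (level : Nat)
    (h1 : PySem.Chars.isIn ['`', '`', '`'] line = false)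
    (h2 : PySem.Chars.isIn ['<', '!', '-', '-'] line = false)
    (h3 : PySem.Chars.isIn ['-', '-', '>'] line = false) :
    getTitleLoopA line chars level false false =
      (level + (chars.takeWhile (· = '#')).length, false, false) := by
  induction chars generalizing level with
  | nil => simp [getTitleLoopA]
  | cons c rest ih =>
    by_cases hc : c = '#'
    · simp [getTitleLoopA, h1, h2, h3, hc, ih]
      omega
    · simp [getTitleLoopA, h1, h2, h3, hc]

-- When none of the substring tests hold and a flag is set, A's loop does nothing.
theorem getTitleLoopA_skip (line : List Char) (chars : List Char) (level : Nat) (cb comb : Bool)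
    (h1 : PySem.Chars.isIn ['`', '`', '`'] line = false)
    (h2 : PySem.Chars.isIn ['<', '!', '-', '-'] line = false)
    (h3 : PySem.Chars.isIn ['-', '-', '>'] line = false)
    (hflag : ¬ (cb = false ∧ comb = false)) :
    getTitleLoopA line chars level cb comb = (level, cb, comb) := by
  induction chars with
  | nil => simp [getTitleLoopA]
  | cons c rest ih => simp [getTitleLoopA, h1, h2, h3, hflag, ih]

theorem length_sub_dropWhile (l : List Char) :
    l.length - (l.dropWhile (· = '#')).length = (l.takeWhile (· = '#')).length := by
  have h := congrArg List.length
    (List.takeWhile_append_dropWhile (p := fun c => decide (c = '#')) (l := l))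
  rw [List.length_append] at h
  omega

-- ===== VERDICT (by name: the statement is the Claim_ definition above) =====
theorem get_title_spec : Claim_equal_get_title := by
  intro line cb comb _
  unfold Spec_get_title get_title get_title_alt
  by_cases h1 : PySem.Chars.isIn ['`', '`', '`'] line.toList = true
  · -- '```' present: the line is nonempty, the loop fires its first branch
    cases hl : line.toList with
    | nil => rw [hl] at h1; exact absurd h1 (by decide)
    | cons c rest => rw [hl] at h1; simp [hl, h1, getTitleLoopA]
  · rw [Bool.not_eq_true] at h1
    by_cases h2 : PySem.Chars.isIn ['<', '!', '-', '-'] line.toList = true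
    · by_cases h3 : PySem.Chars.isIn ['-', '-', '>'] line.toList = true
      · cases hl : line.toList with
        | nil => rw [hl] at h2; exact absurd h2 (by decide)
        | cons c rest =>
          rw [hl] at h1 h2 h3; simp [hl, h1, h2, h3, getTitleLoopA]
      · rw [Bool.not_eq_true] at h3
        cases hl : line.toList with
        | nil => rw [hl] at h2; exact absurd h2 (by decide)
        | cons c rest =>
          rw [hl] at h1 h2 h3; simp [hl, h1, h2, h3, getTitleLoopA]
    · rw [Bool.not_eq_true] at h2
      by_cases h3 : PySem.Chars.isIn ['-', '-', '>'] line.toList = true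
      · cases hl : line.toList with
        | nil => rw [hl] at h3; exact absurd h3 (by decide)
        | cons c rest =>
          rw [hl] at h1 h2 h3; simp [hl, h1, h2, h3, getTitleLoopA]
      · rw [Bool.not_eq_true] at h3
        -- no substring fires: the loop either counts '#'s or skips the whole line
        by_cases hflag : cb = false ∧ comb = false
        · obtain ⟨hcb, hcomb⟩ := hflag
          subst hcb; subst hcomb
          have hcount := getTitleLoopA_count line.toList line.toList 0 h1 h2 h3
          have hlen := length_sub_dropWhile line.toList
          cases hl : line.toList with
          | nil =>
            rw [hl] at h1 h2 h3
            simp [hl, h1, h2, h3, getTitleLoopA]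
          | cons c rest =>
            rw [hl] at h1 h2 h3 hcount hlen
            have hlen' : rest.length + 1 -
                (List.dropWhile (fun x => decide (x = '#')) (c :: rest)).length =
                (List.takeWhile (fun x => decide (x = '#')) (c :: rest)).length := by
              simpa using hlen
            simp [hl, h1, h2, h3, hcount, hlen']
        · have hskip := getTitleLoopA_skip line.toList line.toList 0 cb comb h1 h2 h3 hflag
          cases hl : line.toList with
          | nil =>
            rw [hl] at h1 h2 h3
            simp [hl, h1, h2, h3, hflag, getTitleLoopA]
          | cons c rest =>
            rw [hl] at h1 h2 h3 hskip
            simp [hl, h1, h2, h3, hflag, hskip]
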